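-- pv_equiv track=rewrite | github.com/samirhadii/algorithms | stack/candy_crush_1D.py | recursiveBestCandyCrush
-- ===== SOURCE A (Python) =====
-- def recursiveBestCandyCrush(s):
--     def recursion(s, i):
--         for i in range(i, len(s)):
--             if (
--                 i + 2 < len(s)
--                 and i + 1 < len(s)
--                 and s[i] == s[i + 1]
--                 and s[i] == s[i + 2]
--             ):
--                 j = i
--                 i += 2
--
--                 repeated = s[i]
--                 while i < len(s) and s[i] == repeated:
--                     i += 1
--
--                 left = s[:j]
--                 right = s[i:]
--                 left += right
--
--                 uncrushed = recursion(s, i)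
--                 crushed = recursion(left, 0)
--
--                 return uncrushed if len(uncrushed) < len(crushed) else crushed
--
--         return s
--
--     return recursion(s, 0)
-- ===== SOURCE B (Python) =====
-- def recursiveBestCandyCrush(s):
--     # Memoized dynamic programming over (string, scan-start) states, with a
--     # run-decomposition cut finder instead of A's index-by-index rescan.
--     memo = {}
--
--     def find_cut(s, i):
--         # first (j, e) with j >= i such that s[j:e] is a constant run of the
--         # character s[j] that extends to e with e - j >= 3 and is maximal on the right
--         a = 0
--         n = len(s)
--         while a < n:
--             b = a + 1
--             while b < n and s[b] == s[a]:
--                 b += 1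
--             j = a if a > i else i
--             if b - j >= 3:
--                 return j, b
--             a = b
--         return None
--
--     def go(s, i):
--         key = (s, i)
--         if key in memo:
--             return memo[key]
--         cut = find_cut(s, i)
--         if cut is None:
--             res = s
--         else:
--             j, e = cut
--             uncrushed = go(s, e)
--             crushed = go(s[:j] + s[e:], 0)
--             res = uncrushed if len(uncrushed) < len(crushed) else crushed
--         memo[key] = res
--         return res
--
--     return go(s, 0)
-- ===== Notes on version B (the rewrite author's own statement) =====
-- stated objective: alternative
-- what changed: Replaces A's branching recursion (index-by-index rescan with an inner while, recomputing identical subcalls) by a memoized DP over (string, start) states whose crushable run is found via a run-length decomposition of the string.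
import Mathlib
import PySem

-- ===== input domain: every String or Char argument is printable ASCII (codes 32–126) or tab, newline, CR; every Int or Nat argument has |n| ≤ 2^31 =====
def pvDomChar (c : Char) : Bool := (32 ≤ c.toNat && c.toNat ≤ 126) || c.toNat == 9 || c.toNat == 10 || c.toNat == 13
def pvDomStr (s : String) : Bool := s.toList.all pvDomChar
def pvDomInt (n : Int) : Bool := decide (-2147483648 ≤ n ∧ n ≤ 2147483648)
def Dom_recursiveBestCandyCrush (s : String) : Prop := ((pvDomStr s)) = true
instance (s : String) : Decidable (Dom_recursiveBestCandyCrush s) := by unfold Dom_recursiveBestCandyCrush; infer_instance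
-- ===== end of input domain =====

-- B replaces A's exponential branching recursion by a memoized DP over (string, start)
-- states with a run-decomposition cut finder; equal return value proved on all strings.
-- (The fuel parameters of the Lean ports are totality guards only; the proofs below
-- show they never run out on the fuel the wrappers supply.)

-- ===== PORT A =====

-- Python's `while i < len(s) and s[i] == repeated: i += 1` (A) and
-- `b = a + 1; while b < n and s[b] == s[a]: b += 1` (B) share this loop shape.
def runEndF (l : List Char) (rep : Char) : Nat → Nat → Nat
  | 0, k => k
  | f + 1, k =>
    if k < l.length ∧ l.getD k default = rep then runEndF l rep f (k + 1) else k

-- transliteration of A's inner `recursion(s, i)` (the `for` is the step i → i+1,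
-- the `while` is runEndF, `left = s[:j] + s[i:]` is take/drop)
def recAuxF : Nat → List Char → Nat → List Char
  | 0, l, _ => l
  | f + 1, l, i =>
    if i < l.length then
      if i + 2 < l.length ∧ l.getD i default = l.getD (i + 1) default ∧
          l.getD i default = l.getD (i + 2) default then
        let e := runEndF l (l.getD (i + 2) default) l.length (i + 2)
        let left := l.take i ++ l.drop e
        let uncrushed := recAuxF f l e
        let crushed := recAuxF f left 0
        if uncrushed.length < crushed.length then uncrushed else crushed
      else recAuxF f l (i + 1)
    else l

def recursiveBestCandyCrush (s : String) : String :=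
  String.ofList (recAuxF ((s.toList.length + 1) * (s.toList.length + 3)) s.toList 0)

-- ===== PORT B =====

-- Source B's find_cut: scan the run decomposition, return the first (j, e), j ≥ i,
-- with s[j:e] a constant run reaching length ≥ 3, right-maximal
def findCutF (l : List Char) (i : Nat) : Nat → Nat → Option (Nat × Nat)
  | 0, _ => none
  | f + 1, a =>
    if a < l.length then
      if 3 ≤ runEndF l (l.getD a default) l.length (a + 1) - (if a > i then a else i) then
        some (if a > i then a else i, runEndF l (l.getD a default) l.length (a + 1))
      else findCutF l i f (runEndF l (l.getD a default) l.length (a + 1))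
    else none

-- Source B's memoized go: the memo dict maps (s, i) to the computed result
def goBF : Nat → List Char → Nat → PySem.Dict (List Char × Nat) (List Char) →
    List Char × PySem.Dict (List Char × Nat) (List Char)
  | 0, l, _, memo => (l, memo)
  | f + 1, l, i, memo =>
    match memo.get? (l, i) with
    | some v => (v, memo)
    | none =>
      match findCutF l i l.length 0 with
      | none => (l, memo.insert (l, i) l)
      | some (j, e) =>
        let r1 := goBF f l e memo
        let r2 := goBF f (l.take j ++ l.drop e) 0 r1.2
        let res := if r1.1.length < r2.1.length then r1.1 else r2.1
        (res, r2.2.insert (l, i) res)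

def recursiveBestCandyCrush_alt (s : String) : String :=
  String.ofList
    (goBF ((s.toList.length + 1) * (s.toList.length + 3)) s.toList 0 PySem.Dict.empty).1

-- ===== PRECONDITION & SPEC =====
def Spec_recursiveBestCandyCrush (s : String) (out : String) : Prop := out = recursiveBestCandyCrush_alt s
instance (s : String) (out : String) : Decidable (Spec_recursiveBestCandyCrush s out) := by unfold Spec_recursiveBestCandyCrush; infer_instance

-- ===== CLAIM (what is proved, stated in full; the proofs are below) =====
def Claim_equal_recursiveBestCandyCrush : Prop := ∀ (s : String), Dom_recursiveBestCandyCrush s → Spec_recursiveBestCandyCrush s (recursiveBestCandyCrush s)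

-- ===== LEMMAS AND PROOFS =====

-- proof-side ideal (fuel-free) versions of the four loops
-- measure lemmas cited by the termination proofs of the ports
theorem pvDecSub (n k : Nat) (h : k < n) : n - (k + 1) < n - k := by omega

theorem pvDecScan (n i e : Nat) (hi : i < n) (he : i + 2 < e) : n - e < n - i := by omega

theorem pvDecCrush (l : List Char) (i e : Nat) (h2 : i + 2 < l.length) (he : i + 2 < e)
    (hle : e ≤ l.length) : (List.take i l ++ List.drop e l).length < l.length := by
  simp only [List.length_append, List.length_take, List.length_drop]
  omega

theorem pvDecGo1 (n i j e : Nat) (h1 : i ≤ j) (h2 : j + 3 ≤ e) (h3 : e ≤ n) :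
    n - e < n - i := by omega

theorem pvDecGo2 (l : List Char) (j e : Nat) (h2 : j + 3 ≤ e) (h3 : e ≤ l.length) :
    (List.take j l ++ List.drop e l).length < l.length := by
  simp only [List.length_append, List.length_take, List.length_drop]
  omega

-- Python's `while i < len(s) and s[i] == repeated: i += 1` (A) and
-- `b = a + 1; while b < n and s[b] == s[a]: b += 1` (B) share this loop shape.
def runEnd (l : List Char) (rep : Char) (k : Nat) : Nat :=
  if h : k < l.length ∧ l.getD k default = rep then runEnd l rep (k + 1) else k
termination_by l.length - k
decreasing_by exact pvDecSub l.length k h.1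

theorem runEnd_ge (l : List Char) (rep : Char) (k : Nat) : k ≤ runEnd l rep k := by
  unfold runEnd
  split
  · exact Nat.le_trans (Nat.le_succ k) (runEnd_ge l rep (k + 1))
  · exact Nat.le_refl k
termination_by l.length - k
decreasing_by rename_i h; omega

theorem runEnd_le (l : List Char) (rep : Char) (k : Nat) (hk : k ≤ l.length) :
    runEnd l rep k ≤ l.length := by
  unfold runEnd
  split
  · rename_i h; exact runEnd_le l rep (k + 1) h.1
  · exact hk
termination_by l.length - k
decreasing_by rename_i h; omega

theorem runEnd_gt (l : List Char) (rep : Char) (k : Nat)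
    (h1 : k < l.length) (h2 : l.getD k default = rep) : k < runEnd l rep k := by
  unfold runEnd
  rw [dif_pos ⟨h1, h2⟩]
  exact Nat.lt_of_lt_of_le (Nat.lt_succ_self k) (runEnd_ge l rep (k + 1))

-- transliteration of A's inner `recursion(s, i)` (the `for` is the step i → i+1,
-- the `while` is runEnd, `left = s[:j] + s[i:]` is take/drop)
def recAux (l : List Char) (i : Nat) : List Char :=
  if hi : i < l.length then
    if h : i + 2 < l.length ∧ l.getD i default = l.getD (i + 1) default ∧
        l.getD i default = l.getD (i + 2) default then
      let e := runEnd l (l.getD (i + 2) default) (i + 2)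
      let left := l.take i ++ l.drop e
      let uncrushed := recAux l e
      let crushed := recAux left 0
      if uncrushed.length < crushed.length then uncrushed else crushed
    else recAux l (i + 1)
  else l
termination_by (l.length, l.length - i)
decreasing_by
  · exact Prod.Lex.right _ (pvDecScan l.length i _ hi (runEnd_gt l _ (i + 2) h.1 rfl))
  · exact Prod.Lex.left _ _
      (pvDecCrush l i _ h.1 (runEnd_gt l _ (i + 2) h.1 rfl)
        (runEnd_le l _ (i + 2) (Nat.le_of_lt h.1)))
  · exact Prod.Lex.right _ (pvDecSub l.length i hi)

-- Source B's find_cut: scan the run decomposition, return the first (j, e), j ≥ i,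
-- with s[j:e] a constant run reaching length ≥ 3, right-maximal
def findCut (l : List Char) (i : Nat) (a : Nat) : Option (Nat × Nat) :=
  if ha : a < l.length then
    if 3 ≤ runEnd l (l.getD a default) (a + 1) - (if a > i then a else i) then
      some (if a > i then a else i, runEnd l (l.getD a default) (a + 1))
    else findCut l i (runEnd l (l.getD a default) (a + 1))
  else none
termination_by l.length - a
decreasing_by
  exact Nat.sub_lt_sub_left ha (runEnd_ge l (l.getD a default) (a + 1))

-- bounds needed for goB's termination
theorem findCut_bounds (l : List Char) (i a : Nat) (j e : Nat)
    (h : findCut l i a = some (j, e)) : i ≤ j ∧ j + 3 ≤ e ∧ e ≤ l.length := by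
  rw [findCut.eq_def] at h
  split at h
  · rename_i ha
    have hle := runEnd_le l (l.getD a default) (a + 1) (by omega)
    have hge := runEnd_ge l (l.getD a default) (a + 1)
    split at h
    · rename_i hai
      split at h
      · rename_i h3
        injection h with h'
        injection h' with h1 h2
        omega
      · exact findCut_bounds l i _ j e h
    · rename_i hai
      split at h
      · rename_i h3
        injection h with h'
        injection h' with h1 h2
        omega
      · exact findCut_bounds l i _ j e h
  · exact absurd h (by simp)
termination_by l.length - a
decreasing_by
  all_goals
    have := runEnd_ge l (l.getD a default) (a + 1)
    omega

-- Source B's memoized go: the memo dict maps (s, i) to the computed result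
def goB (l : List Char) (i : Nat) (memo : PySem.Dict (List Char × Nat) (List Char)) :
    List Char × PySem.Dict (List Char × Nat) (List Char) :=
  match memo.get? (l, i) with
  | some v => (v, memo)
  | none =>
    match hc : findCut l i 0 with
    | none => (l, memo.insert (l, i) l)
    | some (j, e) =>
      let r1 := goB l e memo
      let r2 := goB (l.take j ++ l.drop e) 0 r1.2
      let res := if r1.1.length < r2.1.length then r1.1 else r2.1
      (res, r2.2.insert (l, i) res)
termination_by (l.length, l.length - i)
decreasing_by
  · exact Prod.Lex.right _
      (pvDecGo1 l.length i j e (findCut_bounds l i 0 j e hc).1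
        (findCut_bounds l i 0 j e hc).2.1 (findCut_bounds l i 0 j e hc).2.2)
  · exact Prod.Lex.left _ _
      (pvDecGo2 l j e (findCut_bounds l i 0 j e hc).2.1 (findCut_bounds l i 0 j e hc).2.2)

theorem runEnd_mem (l : List Char) (rep : Char) (k : Nat) :
    ∀ x, k ≤ x → x < runEnd l rep k → x < l.length ∧ l.getD x default = rep := by
  intro x hkx hxr
  unfold runEnd at hxr
  split at hxr
  · rename_i h
    rcases Nat.eq_or_lt_of_le hkx with rfl | hlt
    · exact h
    · exact runEnd_mem l rep (k + 1) x hlt hxr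
  · omega
termination_by l.length - k
decreasing_by rename_i _ _ h; omega

theorem runEnd_stop (l : List Char) (rep : Char) (k : Nat)
    (h : runEnd l rep k < l.length) : l.getD (runEnd l rep k) default ≠ rep := by
  by_cases hg : k < l.length ∧ l.getD k default = rep
  · have he : runEnd l rep k = runEnd l rep (k + 1) := by
      conv_lhs => rw [runEnd]
      rw [dif_pos hg]
    rw [he] at h ⊢
    exact runEnd_stop l rep (k + 1) h
  · have he : runEnd l rep k = k := by
      conv_lhs => rw [runEnd]
      rw [dif_neg hg]
    rw [he] at h ⊢
    intro hrep
    exact hg ⟨h, hrep⟩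
termination_by l.length - k
decreasing_by omega

-- a closed characterization of runEnd
theorem runEnd_eq_of (l : List Char) (rep : Char) (k m : Nat) (hkm : k ≤ m)
    (hrun : ∀ x, k ≤ x → x < m → x < l.length ∧ l.getD x default = rep)
    (hstop : l.length ≤ m ∨ l.getD m default ≠ rep) : runEnd l rep k = m := by
  rcases Nat.eq_or_lt_of_le hkm with rfl | hlt
  · unfold runEnd
    rw [dif_neg]
    intro ⟨h1, h2⟩
    rcases hstop with h | h
    · omega
    · exact h h2
  · unfold runEnd
    rw [dif_pos (hrun k (Nat.le_refl k) hlt)]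
    exact runEnd_eq_of l rep (k + 1) m hlt (fun x hx1 hx2 => hrun x (by omega) hx2) hstop
termination_by m - k
decreasing_by omega

def tripleAt (l : List Char) (i : Nat) : Prop :=
  i + 2 < l.length ∧ l.getD i default = l.getD (i + 1) default ∧
    l.getD i default = l.getD (i + 2) default

-- A's scan, isolated: first j ≥ i with a triple, together with the run end
def scanA (l : List Char) (i : Nat) : Option (Nat × Nat) :=
  if i < l.length then
    if i + 2 < l.length ∧ l.getD i default = l.getD (i + 1) default ∧
        l.getD i default = l.getD (i + 2) default then
      some (i, runEnd l (l.getD (i + 2) default) (i + 2))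
    else scanA l (i + 1)
  else none
termination_by l.length - i
decreasing_by rename_i h _; omega

theorem scanA_none_of_ge (l : List Char) (i : Nat) (h : l.length ≤ i) : scanA l i = none := by
  unfold scanA
  rw [if_neg (by omega)]

theorem scanA_step (l : List Char) (i : Nat) (h : ¬ tripleAt l i) :
    scanA l i = scanA l (i + 1) := by
  conv_lhs => rw [scanA]
  rw [if_neg (show ¬ (i + 2 < l.length ∧ l.getD i default = l.getD (i + 1) default ∧
    l.getD i default = l.getD (i + 2) default) from h)]
  split
  · rfl
  · rename_i hi
    exact (scanA_none_of_ge l (i + 1) (by omega)).symm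

theorem scanA_chain (l : List Char) (a y : Nat) (hay : a ≤ y)
    (h : ∀ x, a ≤ x → x < y → ¬ tripleAt l x) : scanA l a = scanA l y := by
  rcases Nat.eq_or_lt_of_le hay with rfl | hlt
  · rfl
  · rw [scanA_step l a (h a (Nat.le_refl a) hlt)]
    exact scanA_chain l (a + 1) y hlt (fun x hx1 hx2 => h x (by omega) hx2)
termination_by y - a
decreasing_by omega

-- recAux in terms of its scan
theorem recAux_eq_scan (l : List Char) (i : Nat) :
    recAux l i = match scanA l i with
      | none => l
      | some (j, e) =>
        let u := recAux l e
        let c := recAux (l.take j ++ l.drop e) 0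
        if u.length < c.length then u else c := by
  conv_lhs => rw [recAux]
  conv_rhs => rw [scanA]
  split
  · rename_i hi
    by_cases h : tripleAt l i
    · rw [dif_pos (show i + 2 < l.length ∧ l.getD i default = l.getD (i + 1) default ∧
        l.getD i default = l.getD (i + 2) default from h),
        if_pos (show i + 2 < l.length ∧ l.getD i default = l.getD (i + 1) default ∧
        l.getD i default = l.getD (i + 2) default from h)]
    · rw [dif_neg (show ¬ (i + 2 < l.length ∧ l.getD i default = l.getD (i + 1) default ∧
        l.getD i default = l.getD (i + 2) default) from h),
        if_neg (show ¬ (i + 2 < l.length ∧ l.getD i default = l.getD (i + 1) default ∧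
        l.getD i default = l.getD (i + 2) default) from h)]
      exact recAux_eq_scan l (i + 1)
  · rfl
termination_by l.length - i
decreasing_by rename_i hi _; omega

-- findCut computes exactly A's scan (from a run start)
theorem findCut_eq_scanA (l : List Char) (i a : Nat)
    (ha : a = 0 ∨ (a < l.length ∧ l.getD (a - 1) default ≠ l.getD a default)) :
    findCut l i a = scanA l (max a i) := by
  conv_lhs => rw [findCut]
  split
  · rename_i halen
    have hb_ge : a + 1 ≤ runEnd l (l.getD a default) (a + 1) :=
      runEnd_ge l (l.getD a default) (a + 1)
    have hb_le : runEnd l (l.getD a default) (a + 1) ≤ l.length :=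
      runEnd_le l (l.getD a default) (a + 1) (by omega)
    set c := l.getD a default with hc
    set b := runEnd l c (a + 1) with hb
    have hrun : ∀ x, a ≤ x → x < b → l.getD x default = c := by
      intro x hx1 hx2
      rcases Nat.eq_or_lt_of_le hx1 with rfl | hx
      · rfl
      · exact (runEnd_mem l c (a + 1) x hx hx2).2
    have hstop : b < l.length → l.getD b default ≠ c := fun hh => runEnd_stop l c (a + 1) hh
    have hj : (if a > i then a else i) = max a i := by split <;> omega
    rw [hj]
    split
    · rename_i hbig
      have hmj : max a i < l.length := by omega
      have ht : tripleAt l (max a i) := by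
        refine ⟨by omega, ?_, ?_⟩
        · rw [hrun (max a i) (by omega) (by omega), hrun (max a i + 1) (by omega) (by omega)]
        · rw [hrun (max a i) (by omega) (by omega), hrun (max a i + 2) (by omega) (by omega)]
      conv_rhs => rw [scanA]
      rw [if_pos hmj, if_pos (show (max a i) + 2 < l.length ∧
        l.getD (max a i) default = l.getD (max a i + 1) default ∧
        l.getD (max a i) default = l.getD (max a i + 2) default from ht)]
      have hre : runEnd l (l.getD (max a i + 2) default) (max a i + 2) = b := by
        rw [hrun (max a i + 2) (by omega) (by omega)]
        refine runEnd_eq_of l c (max a i + 2) b (by omega) ?_ ?_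
        · intro x hx1 hx2
          exact ⟨by omega, hrun x (by omega) hx2⟩
        · rcases Nat.lt_or_ge b l.length with h | h
          · exact Or.inr (hstop h)
          · exact Or.inl h
      rw [hre]
    · rename_i hsmall
      have hnotriple : ∀ x, max a i ≤ x → x < max b i → ¬ tripleAt l x := by
        intro x hx1 hx2 ht
        obtain ⟨hlen, h1, h2⟩ := ht
        have hxb : x < b := by omega
        have hxc : l.getD x default = c := hrun x (by omega) hxb
        rcases Nat.lt_or_ge (x + 2) b with hin | hout
        · exact hsmall (by omega)
        · rcases Nat.eq_or_lt_of_le hout with heq | hlt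
          · -- x + 2 = b
            have hblen : b < l.length := by omega
            exact hstop hblen (by rw [heq, ← h2]; exact hxc)
          · -- x + 1 = b
            have hx1b : x + 1 = b := by omega
            have hblen : b < l.length := by omega
            exact hstop hblen (by rw [← hx1b, ← h1]; exact hxc)
      have hnext : findCut l i b = scanA l (max b i) := by
        rcases Nat.lt_or_ge b l.length with hblen | hblen
        · refine findCut_eq_scanA l i b (Or.inr ⟨hblen, ?_⟩)
          have hbm : l.getD (b - 1) default = c := hrun (b - 1) (by omega) (by omega)
          rw [hbm]
          exact fun hh => hstop hblen hh.symm
        · have h1 : findCut l i b = none := by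
            conv_lhs => rw [findCut]
            rw [dif_neg (by omega)]
          rw [h1, scanA_none_of_ge l (max b i) (by omega)]
      rw [hnext]
      exact (scanA_chain l (max a i) (max b i) (by omega) hnotriple).symm
  · rename_i halen
    rw [scanA_none_of_ge l (max a i) (by omega)]
termination_by l.length - a
decreasing_by
  have := runEnd_ge l (l.getD a default) (a + 1)
  omega

theorem recAux_eq_findCut (l : List Char) (i : Nat) :
    recAux l i = match findCut l i 0 with
      | none => l
      | some (j, e) =>
        let u := recAux l e
        let c := recAux (l.take j ++ l.drop e) 0
        if u.length < c.length then u else c := by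
  rw [findCut_eq_scanA l i 0 (Or.inl rfl)]
  simpa using recAux_eq_scan l i

def GoodMemo (m : PySem.Dict (List Char × Nat) (List Char)) : Prop :=
  ∀ p v, m.get? p = some v → v = recAux p.1 p.2

theorem GoodMemo_insert (m : PySem.Dict (List Char × Nat) (List Char)) (l : List Char)
    (i : Nat) (v : List Char) (hm : GoodMemo m) (hv : v = recAux l i) :
    GoodMemo (m.insert (l, i) v) := by
  intro p w hw
  rw [PySem.Dict.get?_insert] at hw
  split at hw
  · rename_i hp
    subst hp
    injection hw with hw
    rw [← hw]
    exact hv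
  · exact hm p w hw

theorem goB_correct (l : List Char) (i : Nat)
    (m : PySem.Dict (List Char × Nat) (List Char)) :
    GoodMemo m → (goB l i m).1 = recAux l i ∧ GoodMemo (goB l i m).2 := by
  fun_induction goB l i m
  all_goals intro hm
  · rename_i l i memo v hx
    exact ⟨hm _ _ hx, hm⟩
  · rename_i l i memo hx hc
    have h1 : recAux l i = l := by rw [recAux_eq_findCut l i, hc]
    exact ⟨h1.symm, GoodMemo_insert _ _ _ _ hm h1.symm⟩
  · rename_i l i memo hx j e hc r1 r2 res ihA ihB
    obtain ⟨hu, hmu⟩ := ihA hm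
    obtain ⟨hcv, hmc⟩ := ihB hmu
    have h1 : recAux l i = if (recAux l e).length <
          (recAux (List.take j l ++ List.drop e l) 0).length
        then recAux l e else recAux (List.take j l ++ List.drop e l) 0 := by
      rw [recAux_eq_findCut l i, hc]
    have hres : res = recAux l i := by
      simp only [res, r2, r1]
      rw [hu, hcv, h1]
      split_ifs <;> rfl
    exact ⟨hres, GoodMemo_insert _ _ _ _ hmc hres⟩

theorem goB_main (l : List Char) : (goB l 0 PySem.Dict.empty).1 = recAux l 0 := by
  refine (goB_correct l 0 PySem.Dict.empty ?_).1
  intro p v h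
  simp [PySem.Dict.get?_empty] at h


-- ===== fuel adequacy: the fueled ports equal the ideal versions =====

theorem runEndF_eq (l : List Char) (rep : Char) (f k : Nat) (hf : l.length ≤ f + k) :
    runEndF l rep f k = runEnd l rep k := by
  induction f generalizing k with
  | zero =>
    show k = runEnd l rep k
    rw [runEnd, dif_neg (by omega)]
  | succ f ih =>
    by_cases h : k < l.length ∧ l.getD k default = rep
    · have hr : runEnd l rep k = runEnd l rep (k + 1) := by
        conv_lhs => rw [runEnd]
        rw [dif_pos h]
      rw [runEndF, if_pos h, hr]
      exact ih (k + 1) (by omega)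
    · have hr : runEnd l rep k = k := by
        conv_lhs => rw [runEnd]
        rw [dif_neg h]
      rw [runEndF, if_neg h, hr]

theorem findCutF_eq (l : List Char) (i : Nat) (f a : Nat) (hf : l.length ≤ f + a) :
    findCutF l i f a = findCut l i a := by
  induction f generalizing a with
  | zero =>
    show none = findCut l i a
    rw [findCut, dif_neg (by omega)]
  | succ f ih =>
    rw [findCutF]
    conv_rhs => rw [findCut]
    by_cases ha : a < l.length
    · rw [if_pos ha, dif_pos ha,
        runEndF_eq l (l.getD a default) l.length (a + 1) (by omega)]
      split
      all_goals
        split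
        · rfl
        · exact ih (runEnd l (l.getD a default) (a + 1))
            (by have := runEnd_ge l (l.getD a default) (a + 1); omega)
    · rw [if_neg ha, dif_neg ha]

def pvMu (n i : Nat) : Nat := n * (n + 2) + (n - i) + 1

theorem pvMu_crush (n n' i : Nat) (h : n' + 3 ≤ n) : pvMu n' 0 < pvMu n i := by
  obtain ⟨m, rfl⟩ : ∃ m, n = m + 3 := ⟨n - 3, by omega⟩
  have hn' : n' ≤ m := by omega
  unfold pvMu
  have h1 : n' * (n' + 2) ≤ m * (m + 2) := Nat.mul_le_mul hn' (by omega)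
  have h2 : (m + 3) * (m + 3 + 2) = m * (m + 2) + 6 * m + 15 := by ring
  omega

theorem recAuxF_eq (f : Nat) (l : List Char) (i : Nat) (hf : pvMu l.length i ≤ f) :
    recAuxF f l i = recAux l i := by
  induction f generalizing l i with
  | zero => exact absurd hf (by unfold pvMu; omega)
  | succ f ih =>
    rw [recAuxF]
    conv_rhs => rw [recAux]
    by_cases hi : i < l.length
    · rw [if_pos hi, dif_pos hi]
      by_cases h : i + 2 < l.length ∧ l.getD i default = l.getD (i + 1) default ∧
          l.getD i default = l.getD (i + 2) default
      · rw [if_pos h, dif_pos h]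
        rw [runEndF_eq l (l.getD (i + 2) default) l.length (i + 2) (by omega)]
        have he := runEnd_gt l (l.getD (i + 2) default) (i + 2) h.1 rfl
        have hle := runEnd_le l (l.getD (i + 2) default) (i + 2) (Nat.le_of_lt h.1)
        have hcr : (l.take i ++ l.drop (runEnd l (l.getD (i + 2) default) (i + 2))).length + 3
            ≤ l.length := by
          simp only [List.length_append, List.length_take, List.length_drop]
          omega
        have h1 := ih l (runEnd l (l.getD (i + 2) default) (i + 2))
          (by unfold pvMu at hf ⊢; omega)
        have h2 := ih (l.take i ++ l.drop (runEnd l (l.getD (i + 2) default) (i + 2))) 0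
          (by have := pvMu_crush l.length
                ((l.take i ++ l.drop (runEnd l (l.getD (i + 2) default) (i + 2))).length)
                i hcr
              omega)
        simp only [h1, h2]
      · rw [if_neg h, dif_neg h]
        exact ih l (i + 1) (by unfold pvMu at hf ⊢; omega)
    · rw [if_neg hi, dif_neg hi]

theorem goBF_eq (f : Nat) (l : List Char) (i : Nat)
    (m : PySem.Dict (List Char × Nat) (List Char)) (hf : pvMu l.length i ≤ f) :
    goBF f l i m = goB l i m := by
  induction f generalizing l i m with
  | zero => exact absurd hf (by unfold pvMu; omega)
  | succ f ih =>
    rw [goBF]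
    conv_rhs => rw [goB]
    cases hv : m.get? (l, i) with
    | some v => rfl
    | none =>
      rw [findCutF_eq l i l.length 0 (by omega)]
      cases hc : findCut l i 0 with
      | none => rfl
      | some je =>
        obtain ⟨j, e⟩ := je
        have hb := findCut_bounds l i 0 j e hc
        have hcr : (l.take j ++ l.drop e).length + 3 ≤ l.length := by
          simp only [List.length_append, List.length_take, List.length_drop]
          omega
        have h1 := ih l e m (by unfold pvMu at hf ⊢; omega)
        have h2 := ih (l.take j ++ l.drop e) 0 (goB l e m).2
          (by have := pvMu_crush l.length ((l.take j ++ l.drop e).length) i hcr; omega)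
        simp only [h1, h2]

theorem fuel_top (n : Nat) : pvMu n 0 ≤ (n + 1) * (n + 3) := by
  have h : (n + 1) * (n + 3) = n * (n + 2) + 2 * n + 3 := by ring
  unfold pvMu
  omega

-- ===== VERDICT (by name: the statement is the Claim_ definition above) =====
theorem recursiveBestCandyCrush_spec : Claim_equal_recursiveBestCandyCrush := by
  intro s _
  unfold Spec_recursiveBestCandyCrush recursiveBestCandyCrush recursiveBestCandyCrush_alt
  rw [recAuxF_eq _ s.toList 0 (fuel_top s.toList.length),
    goBF_eq _ s.toList 0 PySem.Dict.empty (fuel_top s.toList.length), goB_main]
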